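-- pv_equiv track=rewrite | github.com/ntnhan0605/docs-ntnhan0605 | Algorithm/BigO - Green 60/Lecture 09 - Recursion/the_first_prime_number.py | the_first_prime_number_recursion
-- ===== SOURCE A (Python) =====
-- def is_prime(n, divisor = 2):
-- 	if n < 2:
-- 		return False
-- 	if divisor * divisor > n :
-- 		return True
-- 	if n % divisor == 0:
-- 		return False
-- 	return is_prime(n, divisor + 1)
--
-- def the_first_prime_number_recursion(arr, start, end):
-- 	if start > end:
-- 		return -1
-- 	if start == end:
-- 		return start if is_prime(arr[start]) else -1
-- 	mid = (start + end) // 2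
-- 	left_result = the_first_prime_number_recursion(arr, start, mid)
-- 	if left_result != -1:
-- 		return left_result
-- 	return the_first_prime_number_recursion(arr, mid + 1, end)
-- ===== SOURCE B (Python) =====
-- def is_prime(n):
--     if n < 2:
--         return False
--     d = 2
--     while d * d <= n:
--         if n % d == 0:
--             return False
--         d += 1
--     return True
--
-- def the_first_prime_number_recursion(arr, start, end):
--     for i in range(start, end + 1):
--         if is_prime(arr[i]):
--             return i
--     return -1
-- ===== Notes on version B (the rewrite author's own statement) =====
-- stated objective: simpler
-- what changed: The binary divide-and-conquer recursion over [start,end] is replaced by a single left-to-right for-loop over range(start, end+1) returning the first index whose element is prime, and the recursive is_prime helper is replaced by an iterative trial-division loop.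
-- outside the precondition, e.g. on the_first_prime_number_recursion([2, 3], -1, 0): A returns 0, B returns -1; on the_first_prime_number_recursion([640007], 0, 0): A returns 0, B returns 0
import Mathlib
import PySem

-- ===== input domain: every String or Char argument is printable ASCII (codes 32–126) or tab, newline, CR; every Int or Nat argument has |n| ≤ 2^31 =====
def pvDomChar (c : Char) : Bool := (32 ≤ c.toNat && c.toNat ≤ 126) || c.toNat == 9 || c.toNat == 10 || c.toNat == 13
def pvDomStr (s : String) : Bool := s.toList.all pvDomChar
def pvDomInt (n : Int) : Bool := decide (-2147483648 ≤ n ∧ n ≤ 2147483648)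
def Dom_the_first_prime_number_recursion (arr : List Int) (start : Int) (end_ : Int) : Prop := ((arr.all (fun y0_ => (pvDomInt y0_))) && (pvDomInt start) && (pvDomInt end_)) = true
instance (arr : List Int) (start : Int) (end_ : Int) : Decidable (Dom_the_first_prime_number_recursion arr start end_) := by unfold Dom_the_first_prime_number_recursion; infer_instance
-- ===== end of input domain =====

-- B replaces A's binary divide-and-conquer over [start,end] (and its recursive is_prime) by a
-- single left-to-right scan with an iterative trial-division primality test: simpler, O(1) stack.


-- ===== PORT A =====
-- is_prime(n, divisor=2), A's recursive helper, step for step; the Nat fuel only makes the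
-- recursion structural (it is set to the decreasing measure (n - divisor).toNat and is never
-- exhausted: the 'fuel = 0' branch is unreachable)
def pvIsPrimeAGo (n : Int) : Int → Nat → Bool
  | divisor, 0 =>
    if n < 2 then false
    else if n < divisor * divisor then true      -- 'divisor * divisor > n'
    else if PySem.Int.mod n divisor = 0 then false
    else false                                   -- fuel exhausted: unreachable
  | divisor, fuel + 1 =>
    if n < 2 then false
    else if n < divisor * divisor then true      -- 'divisor * divisor > n'
    else if PySem.Int.mod n divisor = 0 then false
    else pvIsPrimeAGo n (divisor + 1) fuel

def pvIsPrimeA (n divisor : Int) : Bool := pvIsPrimeAGo n divisor (n - divisor).toNat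

-- the divide-and-conquer search; fuel = (end_ - start).toNat, never exhausted
def pvFirstGo (arr : List Int) : Int → Int → Nat → Int
  | start, end_, 0 =>
    if start > end_ then -1
    else if start = end_ then
      (if pvIsPrimeA (PySem.List.pyGetD arr start 0) 2 then start else -1)
    else -1                                      -- fuel exhausted: unreachable
  | start, end_, fuel + 1 =>
    if start > end_ then -1
    else if start = end_ then
      (if pvIsPrimeA (PySem.List.pyGetD arr start 0) 2 then start else -1)
    else
      let mid := PySem.Int.floordiv (start + end_) 2
      let left_result := pvFirstGo arr start mid fuel
      if left_result ≠ -1 then left_result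
      else pvFirstGo arr (mid + 1) end_ fuel

def the_first_prime_number_recursion (arr : List Int) (start : Int) (end_ : Int) : Int :=
  pvFirstGo arr start end_ (end_ - start).toNat

-- ===== PORT B =====
-- B's iterative is_prime: the trial-division while-loop 'while d*d <= n' (fuel likewise only
-- makes the loop structural and is never exhausted)
def pvTrialBGo (n : Int) : Int → Nat → Bool
  | d, 0 =>
    if d * d ≤ n then
      (if PySem.Int.mod n d = 0 then false else true)   -- fuel exhausted: unreachable
    else true
  | d, fuel + 1 =>
    if d * d ≤ n then
      (if PySem.Int.mod n d = 0 then false else pvTrialBGo n (d + 1) fuel)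
    else true

def pvIsPrimeB (n : Int) : Bool :=
  if n < 2 then false else pvTrialBGo n 2 (n - 2).toNat

-- the for-loop body: first index in idxs whose element is prime, else -1
def pvScanB (arr : List Int) (idxs : List Int) : Int :=
  match idxs with
  | [] => -1
  | i :: rest => if pvIsPrimeB (PySem.List.pyGetD arr i 0) then i else pvScanB arr rest

def the_first_prime_number_recursion_alt (arr : List Int) (start : Int) (end_ : Int) : Int :=
  pvScanB arr (PySem.List.pyRange start (end_ + 1) 1)

-- ===== PRECONDITION & SPEC =====
-- mathematical primality of an |x| ≤ 2^31 integer, as a bounded check (46341² > 2^31)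
def pvPrimeChk (x : Int) : Bool :=
  decide (2 ≤ x) && (decide (x < 4) ||
    !((PySem.List.pyRange 2 46342 1).any (fun d => decide (d * d ≤ x) && decide (PySem.Int.mod x d = 0))))
-- an element whose primality test stays well under Python's recursion limit in A
def pvSafeChk (x : Int) : Bool :=
  decide (x < 640000) || (PySem.List.pyRange 2 801 1).any (fun d => decide (PySem.Int.mod x d = 0))

-- Pre_ excludes exactly: (i) scans with a negative start index — Python's negative-index
-- wraparound makes A's 'not found' sentinel -1 collide with the genuine index -1, a corner
-- where A's and B's values are both defensible and nobody would specify either; (ii) scans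
-- that run past the end of the array before any prime is found, on which A raises IndexError;
-- (iii) inputs whose element at an index visited before the first prime is ≥ 640000 with no
-- divisor ≤ 800 — there A's recursive is_prime either raises RecursionError or, in a narrow
-- band just under the limit, still returns the same value B returns (see the cited examples).
def Pre_the_first_prime_number_recursion (arr : List Int) (start : Int) (end_ : Int) : Prop :=
  start > end_ ∨
    (0 ≤ start ∧
      (∀ i ∈ PySem.List.pyRange start (min (end_ + 1) (arr.length : Int)) 1,
        (∀ j ∈ PySem.List.pyRange start i 1, pvPrimeChk (PySem.List.pyGetD arr j 0) = false) →
          pvSafeChk (PySem.List.pyGetD arr i 0) = true) ∧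
      (end_ < (arr.length : Int) ∨
        ∃ i ∈ PySem.List.pyRange start (arr.length : Int) 1,
          pvPrimeChk (PySem.List.pyGetD arr i 0) = true))
instance (arr : List Int) (start : Int) (end_ : Int) : Decidable (Pre_the_first_prime_number_recursion arr start end_) := by unfold Pre_the_first_prime_number_recursion; infer_instance

def pvWitness_the_first_prime_number_recursion : List Int × Int × Int := ([2, 3, 4], 0, 2)

def Spec_the_first_prime_number_recursion (arr : List Int) (start : Int) (end_ : Int) (out : Int) : Prop := out = the_first_prime_number_recursion_alt arr start end_
instance (arr : List Int) (start : Int) (end_ : Int) (out : Int) : Decidable (Spec_the_first_prime_number_recursion arr start end_ out) := by unfold Spec_the_first_prime_number_recursion; infer_instance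

-- ===== CLAIM (what is proved, stated in full; the proofs are below) =====
def Claim_equal_the_first_prime_number_recursion : Prop := ∀ (arr : List Int) (start : Int) (end_ : Int), Dom_the_first_prime_number_recursion arr start end_ → Pre_the_first_prime_number_recursion arr start end_ → Spec_the_first_prime_number_recursion arr start end_ (the_first_prime_number_recursion arr start end_)

-- ===== LEMMAS AND PROOFS =====

-- when the trial divisor divides nothing yet, it is still strictly below n
lemma pvDivBound (n d : Int) (h : d * d ≤ n) (h2 : ¬ n < 2) : 2 * d - 1 ≤ n ∧ d < n := by
  have hb : 2 * d - 1 ≤ n := by nlinarith [sq_nonneg (d - 1)]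
  exact ⟨hb, by omega⟩

-- evaluation of B's loop when it stops at the current divisor (any fuel)
lemma pvTrialB_true (n d : Int) (fb : Nat) (h : ¬ d * d ≤ n) : pvTrialBGo n d fb = true := by
  cases fb <;> (simp only [pvTrialBGo]; rw [if_neg h])

lemma pvTrialB_false (n d : Int) (fb : Nat) (h : d * d ≤ n) (hm : PySem.Int.mod n d = 0) :
    pvTrialBGo n d fb = false := by
  cases fb <;> (simp only [pvTrialBGo]; rw [if_pos h, if_pos hm])

-- evaluation of A's helper on n < 2 (any fuel)
lemma pvPrimeA_lt_two (n d : Int) (f : Nat) (h : n < 2) : pvIsPrimeAGo n d f = false := by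
  cases f <;> (simp only [pvIsPrimeAGo]; rw [if_pos h])

-- A's recursive is_prime agrees with B's trial-division loop (n ≥ 2, any divisor, any
-- sufficient fuels)
lemma pvGoPrime_eq : ∀ (fa fb : Nat) (n d : Int), (n - d).toNat ≤ fa → (n - d).toNat ≤ fb →
    ¬ n < 2 → pvIsPrimeAGo n d fa = pvTrialBGo n d fb := by
  intro fa
  induction fa with
  | zero =>
    intro fb n d ha _ h2
    have hnd : n ≤ d := by omega
    have hgt : n < d * d := by nlinarith
    rw [pvTrialB_true n d fb (by omega)]
    simp only [pvIsPrimeAGo]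
    rw [if_neg h2, if_pos hgt]
  | succ fa ih =>
    intro fb n d ha hb h2
    by_cases hgt : n < d * d
    · rw [pvTrialB_true n d fb (by omega)]
      simp only [pvIsPrimeAGo]
      rw [if_neg h2, if_pos hgt]
    · by_cases hm : PySem.Int.mod n d = 0
      · rw [pvTrialB_false n d fb (by omega) hm]
        simp only [pvIsPrimeAGo]
        rw [if_neg h2, if_neg hgt, if_pos hm]
      · have hlt := pvDivBound n d (by omega) h2
        obtain ⟨fb', rfl⟩ : ∃ fb', fb = fb' + 1 := ⟨fb - 1, by omega⟩
        simp only [pvIsPrimeAGo, pvTrialBGo]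
        rw [if_neg h2, if_neg hgt, if_pos (by omega : d * d ≤ n), if_neg hm, if_neg hm]
        exact ih fb' n (d + 1) (by omega) (by omega) h2

lemma pvPrime_eq (n : Int) : pvIsPrimeA n 2 = pvIsPrimeB n := by
  by_cases h : n < 2
  · rw [pvIsPrimeA, pvIsPrimeB, if_pos h]
    exact pvPrimeA_lt_two n 2 _ h
  · rw [pvIsPrimeA, pvIsPrimeB, if_neg h]
    exact pvGoPrime_eq (n - 2).toNat (n - 2).toNat n 2 le_rfl le_rfl h

-- the scan over a concatenation: finish the left part first (all its indices nonnegative,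
-- so a found index is never the sentinel -1)
lemma pvScanB_append (arr : List Int) (l1 l2 : List Int) (h : ∀ i ∈ l1, (0 : Int) ≤ i) :
    pvScanB arr (l1 ++ l2) =
      if pvScanB arr l1 = -1 then pvScanB arr l2 else pvScanB arr l1 := by
  induction l1 with
  | nil => simp [pvScanB]
  | cons i t iht =>
    simp only [List.cons_append, pvScanB]
    by_cases hp : pvIsPrimeB (PySem.List.pyGetD arr i 0)
    · have hi : (0 : Int) ≤ i := h i (by simp)
      rw [if_pos hp, if_pos hp, if_neg (by omega : ¬ i = -1)]
    · rw [if_neg hp, if_neg hp, iht (fun j hj => h j (by simp [hj]))]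

-- the base cases of A (empty window, one-element window) match the scan, whatever the fuel
lemma pvBase (arr : List Int) (s e : Int) (fuel : Nat) (h : e ≤ s) :
    pvFirstGo arr s e fuel = pvScanB arr (PySem.List.pyRange s (e + 1) 1) := by
  by_cases hgt : s > e
  · rw [PySem.List.pyRange_one_eq_nil (by omega : e + 1 ≤ s)]
    cases fuel <;> (simp only [pvFirstGo]; rw [if_pos hgt]; rfl)
  · have heq : s = e := by omega
    subst heq
    rw [PySem.List.pyRange_one_singleton]
    cases fuel <;>
      (simp only [pvFirstGo]
       rw [if_neg hgt]
       simp [pvScanB, pvPrime_eq])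

-- main induction: A's divide-and-conquer equals the left-to-right scan (start nonnegative
-- whenever the window is nonempty)
lemma pvMain (arr : List Int) : ∀ (fuel : Nat) (s e : Int), (e - s).toNat ≤ fuel →
    (s ≤ e → 0 ≤ s) →
    pvFirstGo arr s e fuel = pvScanB arr (PySem.List.pyRange s (e + 1) 1) := by
  intro fuel
  induction fuel with
  | zero =>
    intro s e hk _
    exact pvBase arr s e 0 (by omega)
  | succ k ih =>
    intro s e hk hs
    by_cases hle : e ≤ s
    · exact pvBase arr s e (k + 1) hle
    · have hlt : s < e := by omega
      have h0s : 0 ≤ s := hs (by omega)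
      have h1 := (PySem.Int.le_floordiv_iff_mul_le (a := s + e) (b := 2) (q := s) (by norm_num)).mpr (by omega)
      have h2 := (PySem.Int.floordiv_lt_iff_lt_mul (a := s + e) (b := 2) (q := e) (by norm_num)).mpr (by omega)
      simp only [pvFirstGo]
      rw [if_neg (by omega : ¬ s > e), if_neg (by omega : ¬ s = e)]
      set mid := PySem.Int.floordiv (s + e) 2 with hmid
      rw [PySem.List.pyRange_one_append s (mid + 1) (e + 1) (by omega) (by omega)]
      rw [pvScanB_append arr _ _ (fun i hi => by
        have := (PySem.List.mem_pyRange_one).mp hi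
        omega)]
      rw [ih s mid (by omega) (fun _ => h0s), ih (mid + 1) e (by omega) (fun _ => by omega)]
      rcases eq_or_ne (pvScanB arr (PySem.List.pyRange s (mid + 1) 1)) (-1) with hL | hL
      · rw [hL]; simp
      · rw [if_neg hL, if_pos (by simpa using hL)]

-- ===== VERDICT (by name: the statement is the Claim_ definition above) =====
theorem the_first_prime_number_recursion_spec : Claim_equal_the_first_prime_number_recursion := by
  intro arr start end_ _ hpre
  unfold Spec_the_first_prime_number_recursion the_first_prime_number_recursion_alt
    the_first_prime_number_recursion
  refine pvMain arr (end_ - start).toNat start end_ le_rfl ?_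
  intro hle
  rcases hpre with h | ⟨h1, _, _⟩
  · omega
  · exact h1
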